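-- pv_equiv track=rewrite | github.com/rahulyd078z/DSA | Q1B.py | keyword_sentences
-- ===== SOURCE A (Python) =====
-- def keyword_sentences(user_query, marketing_keywords_dictionary):
--     word_set = set(marketing_keywords_dictionary)
--     memo = {}
--
--     def dfs(start):
--         # If already computed, return stored result
--         if start in memo:
--             return memo[start]
--
--         # If reached end of string, one valid sentence (empty tail)
--         if start == len(user_query):
--             return [""]
--
--         sentences = []
--
--         for end in range(start + 1, len(user_query) + 1):
--             word = user_query[start:end]
--
--             if word in word_set:
--                 # Getting sentences for remaining string
--                 for tail in dfs(end):
--                     if tail: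
--                         sentences.append(word + " " + tail)
--                     else:
--                         sentences.append(word)
--
--         memo[start] = sentences
--         return sentences
--
--     return dfs(0)
-- ===== SOURCE B (Python) =====
-- def keyword_sentences(user_query, marketing_keywords_dictionary):
--     n = len(user_query)
--     word_set = set(marketing_keywords_dictionary)
--     dp = [None] * n + [[""]]
--     for start in range(n - 1, -1, -1):
--         row = []
--         for end in range(start + 1, n + 1):
--             word = user_query[start:end]
--             if word in word_set:
--                 row.extend(word if not tail else word + " " + tail
--                            for tail in dp[end])
--         dp[start] = row
--     return dp[0]
-- ===== Notes on version B (the rewrite author's own statement) =====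
-- stated objective: alternative
-- what changed: Replaces the top-down memoized DFS recursion with an explicit bottom-up DP table dp[i] of all sentences for user_query[i:], filled right-to-left with plain nested loops.
import Mathlib
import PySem

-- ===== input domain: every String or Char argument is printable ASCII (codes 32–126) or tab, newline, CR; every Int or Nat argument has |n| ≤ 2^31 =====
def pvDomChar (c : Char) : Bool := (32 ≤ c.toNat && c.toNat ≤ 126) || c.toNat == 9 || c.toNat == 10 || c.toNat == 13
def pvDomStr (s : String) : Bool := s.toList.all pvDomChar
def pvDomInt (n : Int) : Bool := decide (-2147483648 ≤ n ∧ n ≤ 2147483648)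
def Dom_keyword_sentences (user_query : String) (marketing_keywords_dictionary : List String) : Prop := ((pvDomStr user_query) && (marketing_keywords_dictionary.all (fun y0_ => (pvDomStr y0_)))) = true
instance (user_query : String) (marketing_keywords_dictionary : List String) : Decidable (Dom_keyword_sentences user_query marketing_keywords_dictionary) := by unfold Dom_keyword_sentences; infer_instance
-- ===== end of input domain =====

-- B replaces A's top-down memoized recursion by a bottom-up DP table filled right-to-left
-- (alternative decomposition, same results); the proof shows the return values are equal.

-- ===== PORT A =====
-- A's dfs, ported with explicit fuel (fuel ≥ len - start on every call the program makes;
-- the memo dictionary only caches results and never changes a value, so it is not modelled).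
def pvDfsA (cs : List Char) (ws : PySem.Set String) : Nat → Nat → List String
  | 0, start => if start = cs.length then [""] else []
  | f + 1, start =>
    if start = cs.length then [""]
    else
      (List.range' (start + 1) (cs.length - start)).foldl
        (fun sentences (e : Nat) =>
          let word : String := String.ofList (PySem.List.slice cs (some (start : Int)) (some (e : Int)))
          if PySem.Set.contains ws word then
            (pvDfsA cs ws f e).foldl
              (fun sentences tail =>
                if tail ≠ "" then sentences ++ [word ++ " " ++ tail]
                else sentences ++ [word])
              sentences
          else sentences)
        []

def keyword_sentences (user_query : String) (marketing_keywords_dictionary : List String) : List String :=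
  pvDfsA user_query.toList (PySem.Set.ofList marketing_keywords_dictionary) user_query.toList.length 0

-- ===== PORT B =====
-- inner loop of B: walk the already-computed rows dp[end], dp[end+1], …, dp[n] while e counts up.
def pvRowB (cs : List Char) (ws : PySem.Set String) (start : Nat) : Nat → List (List String) → List String → List String
  | _, [], row => row
  | e, tl :: rest, row =>
    let word : String := String.ofList (PySem.List.slice cs (some (start : Int)) (some (e : Int)))
    pvRowB cs ws start (e + 1) rest
      (if PySem.Set.contains ws word then
        row ++ tl.map (fun tail => if tail = "" then word else word ++ " " ++ tail)
      else row)

-- pvRows m = [dp[n-m], …, dp[n]] of B's table, built bottom-up.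
def pvRows (cs : List Char) (ws : PySem.Set String) : Nat → List (List String)
  | 0 => [[""]]
  | m + 1 =>
    let prev := pvRows cs ws m
    let start := cs.length - (m + 1)
    pvRowB cs ws start (start + 1) prev [] :: prev

def keyword_sentences_alt (user_query : String) (marketing_keywords_dictionary : List String) : List String :=
  (pvRows user_query.toList (PySem.Set.ofList marketing_keywords_dictionary) user_query.toList.length).headD []

-- ===== PRECONDITION & SPEC =====
def Spec_keyword_sentences (user_query : String) (marketing_keywords_dictionary : List String) (out : List String) : Prop := out = keyword_sentences_alt user_query marketing_keywords_dictionary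
instance (user_query : String) (marketing_keywords_dictionary : List String) (out : List String) : Decidable (Spec_keyword_sentences user_query marketing_keywords_dictionary out) := by unfold Spec_keyword_sentences; infer_instance

-- ===== CLAIM (what is proved, stated in full; the proofs are below) =====
def Claim_equal_keyword_sentences : Prop := ∀ (user_query : String) (marketing_keywords_dictionary : List String), Dom_keyword_sentences user_query marketing_keywords_dictionary → Spec_keyword_sentences user_query marketing_keywords_dictionary (keyword_sentences user_query marketing_keywords_dictionary)

-- ===== LEMMAS AND PROOFS =====

theorem pvFoldAppend (w : String) : ∀ (l row : List String),
    l.foldl (fun s t => if t ≠ "" then s ++ [w ++ " " ++ t] else s ++ [w]) row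
    = row ++ l.map (fun t => if t = "" then w else w ++ " " ++ t) := by
  intro l
  induction l with
  | nil => intro row; simp
  | cons t ts ih =>
    intro row
    rw [List.foldl_cons, ih]
    by_cases h : t = "" <;> simp [h]

-- fuel irrelevance for A's dfs
theorem pvDfsA_fuel (cs : List Char) (ws : PySem.Set String) :
    ∀ f g start, cs.length - start ≤ f → cs.length - start ≤ g →
      pvDfsA cs ws f start = pvDfsA cs ws g start := by
  intro f
  induction f with
  | zero =>
    intro g start h1 h2
    cases g with
    | zero => rfl
    | succ g' =>
      simp only [pvDfsA]
      by_cases hs : start = cs.length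
      · simp [hs]
      · have h0 : cs.length - start = 0 := by omega
        simp [hs, h0]
  | succ f ih =>
    intro g start h1 h2
    cases g with
    | zero =>
      simp only [pvDfsA]
      by_cases hs : start = cs.length
      · simp [hs]
      · have h0 : cs.length - start = 0 := by omega
        simp [hs, h0]
    | succ g' =>
      simp only [pvDfsA]
      by_cases hs : start = cs.length
      · simp [hs]
      · simp only [if_neg hs]
        refine PySem.List.foldl_congr_mem _ _ _ _ ?_
        intro acc e he
        have hb := List.mem_range'_1.mp he
        rw [ih g' e (by omega) (by omega)]

theorem pvDfsA_at_end (cs : List Char) (ws : PySem.Set String) (f : Nat) :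
    pvDfsA cs ws f cs.length = [""] := by
  cases f <;> simp [pvDfsA]

theorem pvDfsA_unfold (cs : List Char) (ws : PySem.Set String) (start : Nat)
    (h : start < cs.length) :
    pvDfsA cs ws cs.length start
    = (List.range' (start + 1) (cs.length - start)).foldl
        (fun sentences (e : Nat) =>
          let word : String := String.ofList (PySem.List.slice cs (some (start : Int)) (some (e : Int)))
          if PySem.Set.contains ws word then
            (pvDfsA cs ws cs.length e).foldl
              (fun sentences tail =>
                if tail ≠ "" then sentences ++ [word ++ " " ++ tail]
                else sentences ++ [word])
              sentences
          else sentences)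
        [] := by
  obtain ⟨f, hf⟩ : ∃ f, cs.length = f + 1 := ⟨cs.length - 1, by omega⟩
  conv_lhs => rw [hf]
  simp only [pvDfsA, if_neg (by omega : ¬ start = cs.length)]
  refine PySem.List.foldl_congr_mem _ _ _ _ ?_
  intro acc e he
  have hb := List.mem_range'_1.mp he
  rw [pvDfsA_fuel cs ws f cs.length e (by omega) (by omega)]

theorem pvRowB_spec (cs : List Char) (ws : PySem.Set String) (start : Nat) :
    ∀ (k e : Nat) (row : List String),
      pvRowB cs ws start e ((List.range' e k).map (pvDfsA cs ws cs.length)) row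
      = (List.range' e k).foldl
          (fun sentences (e' : Nat) =>
            let word : String := String.ofList (PySem.List.slice cs (some (start : Int)) (some (e' : Int)))
            if PySem.Set.contains ws word then
              (pvDfsA cs ws cs.length e').foldl
                (fun sentences tail =>
                  if tail ≠ "" then sentences ++ [word ++ " " ++ tail]
                  else sentences ++ [word])
                sentences
            else sentences)
          row := by
  intro k
  induction k with
  | zero => intro e row; rfl
  | succ k ih =>
    intro e row
    rw [List.range'_succ]
    simp only [List.map_cons, List.foldl_cons, pvRowB, ih]
    congr 1
    by_cases hc : PySem.Set.contains ws
        (String.ofList (PySem.List.slice cs (some (start : Int)) (some (e : Int)))) = true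
    · rw [if_pos hc, if_pos hc, pvFoldAppend]
    · rw [if_neg hc, if_neg hc]

theorem pvRows_spec (cs : List Char) (ws : PySem.Set String) :
    ∀ m, m ≤ cs.length →
      pvRows cs ws m = (List.range' (cs.length - m) (m + 1)).map (pvDfsA cs ws cs.length) := by
  intro m
  induction m with
  | zero =>
    intro _
    simp [pvRows, List.range', pvDfsA_at_end]
  | succ m ih =>
    intro hm
    have hstart : cs.length - (m + 1) + 1 = cs.length - m := by omega
    rw [List.range'_succ]
    simp only [pvRows, List.map_cons]
    rw [ih (by omega)]
    congr 1
    · rw [hstart]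
      rw [← hstart] at *
      rw [pvRowB_spec cs ws (cs.length - (m + 1)) (m + 1) (cs.length - (m + 1) + 1) []]
      rw [pvDfsA_unfold cs ws (cs.length - (m + 1)) (by omega)]
      have hk : cs.length - (cs.length - (m + 1)) = m + 1 := by omega
      rw [hk]
    · rw [hstart]

-- ===== VERDICT (by name: the statement is the Claim_ definition above) =====
theorem keyword_sentences_spec : Claim_equal_keyword_sentences := by
  intro q d _
  unfold Spec_keyword_sentences keyword_sentences keyword_sentences_alt
  rw [pvRows_spec _ _ _ (le_refl _)]
  simp [List.range']
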